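-- pv_equiv track=rewrite | github.com/smandla/interviewpractice | pramp/busiestTimeInMall.py | busiestTimeInMall
-- ===== SOURCE A (Python) =====
-- def busiestTimeInMall(data):
--     n = len(data)
--     counter = 0
--     maxCount = 0
--     timestamp = None
--
--     for i in range(n):
--         curTime, visitorCount, entered = data[i]
--         if entered:
--             counter += visitorCount
--         else:
--             counter -= visitorCount
--         if i < n -1 and curTime == data[i + 1][0]:
--             continue
--         if counter > maxCount:
--             maxCount = counter
--             timestamp = curTime
--     return timestamp
-- ===== SOURCE B (Python) =====
-- def busiestTimeInMall(data):
--     if not data: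
--         return None
--     # staged passes: prefix sums, boundary pairs, global max, first match
--     counts = []
--     s = 0
--     for _, v, e in data:
--         s += v if e else -v
--         counts.append(s)
--     pairs = list(zip([t for t, _, _ in data], counts))
--     boundaries = [pairs[i] for i in range(len(pairs))
--                   if i == len(pairs) - 1 or pairs[i][0] != pairs[i + 1][0]]
--     best = max(c for _, c in boundaries)
--     if best <= 0:
--         return None
--     for t, c in boundaries:
--         if c == best:
--             return t
-- ===== Notes on version B (the rewrite author's own statement) =====
-- stated objective: alternative
-- what changed: Replaced A's single-pass running-max loop (with lookahead-and-continue) by staged passes: build the prefix-sum list, select the boundary (timestamp,count) pairs, take the global max with max(), and return the first boundary timestamp attaining it.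
import Mathlib
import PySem

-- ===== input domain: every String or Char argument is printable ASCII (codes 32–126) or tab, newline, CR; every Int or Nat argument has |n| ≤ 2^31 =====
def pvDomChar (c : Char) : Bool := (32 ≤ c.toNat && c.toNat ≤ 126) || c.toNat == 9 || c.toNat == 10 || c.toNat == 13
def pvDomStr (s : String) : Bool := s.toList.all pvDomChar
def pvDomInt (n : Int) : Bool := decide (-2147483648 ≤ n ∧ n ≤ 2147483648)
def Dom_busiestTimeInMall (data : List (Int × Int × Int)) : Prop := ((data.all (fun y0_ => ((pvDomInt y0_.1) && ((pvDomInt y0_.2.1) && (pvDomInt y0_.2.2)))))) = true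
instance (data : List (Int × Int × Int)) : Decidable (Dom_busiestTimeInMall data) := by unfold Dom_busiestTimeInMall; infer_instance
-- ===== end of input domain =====

-- B replaces A's one-pass running-max loop by staged passes (prefix sums,
-- boundary pairs, global max, first match); objective: alternative, same O(n).

-- ===== PORT A =====
-- one iteration of A's 'for i in range(n)' body
def pvAStep (data : List (Int × Int × Int)) (st : Int × Int × Option Int) (i : Int) :
    Int × Int × Option Int :=
  match PySem.List.pyGet? data i with
  | none => st
  | some ev =>
    let counter := if ev.2.2 ≠ 0 then st.1 + ev.2.1 else st.1 - ev.2.1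
    if i < (data.length : Int) - 1 ∧
        (PySem.List.pyGet? data (i + 1)).map (·.1) = some ev.1 then
      (counter, st.2.1, st.2.2)   -- continue
    else if counter > st.2.1 then (counter, counter, some ev.1)
    else (counter, st.2.1, st.2.2)

def busiestTimeInMall (data : List (Int × Int × Int)) : Option Int :=
  ((PySem.List.pyRange 0 (data.length : Int) 1).foldl (pvAStep data) (0, 0, none)).2.2

-- ===== PORT B =====
-- pass 1: the prefix-sum list of signed visitor counts ('counts' in Source B)
def pvCounts (s : Int) : List (Int × Int × Int) → List Int
  | [] => []
  | x :: xs =>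
    let s' := if x.2.2 ≠ 0 then s + x.2.1 else s - x.2.1
    s' :: pvCounts s' xs

-- pass 2: keep pairs[i] when i == len-1 or pairs[i][0] != pairs[i+1][0]
def pvBounds : List (Int × Int) → List (Int × Int)
  | [] => []
  | [x] => [x]
  | x :: y :: xs => if x.1 ≠ y.1 then x :: pvBounds (y :: xs) else pvBounds (y :: xs)

def busiestTimeInMall_alt (data : List (Int × Int × Int)) : Option Int :=
  match data with
  | [] => none
  | _ =>
    let pairs := (data.map (·.1)).zip (pvCounts 0 data)
    let bounds := pvBounds pairs
    match PySem.List.max? (bounds.map (·.2)) (fun y => y) with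
    | none => none
    | some best =>
      if best ≤ 0 then none
      else (bounds.find? (fun p => p.2 == best)).map (·.1)

-- ===== PRECONDITION & SPEC =====
def Spec_busiestTimeInMall (data : List (Int × Int × Int)) (out : Option Int) : Prop := out = busiestTimeInMall_alt data
instance (data : List (Int × Int × Int)) (out : Option Int) : Decidable (Spec_busiestTimeInMall data out) := by unfold Spec_busiestTimeInMall; infer_instance

-- ===== CLAIM =====
def Claim_equal_busiestTimeInMall : Prop := ∀ (data : List (Int × Int × Int)), Dom_busiestTimeInMall data → Spec_busiestTimeInMall data (busiestTimeInMall data)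

-- ===== LEMMAS AND PROOFS =====

-- A's loop as a structural recursion with one-element lookahead
def pvARec : Int × Int × Option Int → List (Int × Int × Int) → Int × Int × Option Int
  | st, [] => st
  | (c, m, t), x :: xs =>
    let c' := if x.2.2 ≠ 0 then c + x.2.1 else c - x.2.1
    if xs.head?.map (·.1) = some x.1 then pvARec (c', m, t) xs
    else if c' > m then pvARec (c', c', some x.1) xs
    else pvARec (c', m, t) xs

theorem pvA_fold_eq_rec (data : List (Int × Int × Int)) (k : Nat) (st : Int × Int × Option Int) :
    (PySem.List.pyRange (k : Int) (data.length : Int) 1).foldl (pvAStep data) st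
      = pvARec st (data.drop k) := by
  rcases Nat.lt_or_ge k data.length with hk | hk
  · rw [PySem.List.pyRange_one_cons (by exact_mod_cast hk), List.foldl_cons]
    have hcast : ((k : Int) + 1) = ((k + 1 : Nat) : Int) := by push_cast; ring
    rw [hcast, pvA_fold_eq_rec data (k + 1) _]
    rw [List.drop_eq_getElem_cons hk]
    obtain ⟨c, m, t⟩ := st
    have hget : PySem.List.pyGet? data (k : Int) = some data[k] := by
      rw [PySem.List.pyGet?_natCast]; exact List.getElem?_eq_getElem hk
    have hget1 : PySem.List.pyGet? data ((k + 1 : Nat) : Int) = data[k + 1]? := by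
      rw [PySem.List.pyGet?_natCast]
    have hcond : ((k : Int) < (data.length : Int) - 1 ∧
          (data[k + 1]?).map (·.1) = some (data[k].1)) ↔
        ((data.drop (k + 1)).head?.map (·.1) = some (data[k].1)) := by
      rw [List.head?_drop]
      constructor
      · exact And.right
      · intro h
        refine ⟨?_, h⟩
        by_contra hlt
        have hnone : data[k + 1]? = none := List.getElem?_eq_none (by omega)
        simp [hnone] at h
    simp only [pvAStep, pvARec, hget, hcast, hget1]
    by_cases hc : (data.drop (k + 1)).head?.map (·.1) = some (data[k].1)
    · rw [if_pos (hcond.mpr hc), if_pos hc]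
    · rw [if_neg (fun h => hc (hcond.mp h)), if_neg hc]
      split_ifs <;> rfl
  · rw [PySem.List.pyRange_one_eq_nil (by exact_mod_cast hk),
      List.drop_eq_nil_of_le hk]
    rfl
termination_by data.length - k

-- the selection A performs at boundary pairs, isolated as a loop
def pvSel : Int → Option Int → List (Int × Int) → Option Int
  | _, t, [] => t
  | m, t, (k, c) :: bs => if c > m then pvSel c (some k) bs else pvSel m t bs

-- A's recursion computes pvSel over the boundary pairs of the prefix sums
theorem pvARec_eq_sel (data : List (Int × Int × Int)) (c m : Int) (t : Option Int) :
    (pvARec (c, m, t) data).2.2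
      = pvSel m t (pvBounds ((data.map (·.1)).zip (pvCounts c data))) := by
  induction data generalizing c m t with
  | nil => rfl
  | cons x xs ih =>
    simp only [pvARec, pvCounts, List.map_cons, List.zip_cons_cons]
    set c' := if x.2.2 ≠ 0 then c + x.2.1 else c - x.2.1 with hc'
    cases xs with
    | nil =>
      simp only [List.head?_nil, Option.map_none, List.map_nil, pvCounts,
        List.zip_nil_right, pvBounds, pvSel]
      rw [if_neg (by simp)]
      split_ifs <;> rfl
    | cons y ys =>
      simp only [List.head?_cons, Option.map_some, Option.some.injEq,
        List.map_cons, pvCounts, List.zip_cons_cons, pvBounds]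
      by_cases hy : y.1 = x.1
      · have h2 : ¬ (x.1 ≠ y.1) := by simp [hy]
        rw [if_pos hy, if_neg h2]
        exact ih c' m t
      · have h2 : x.1 ≠ y.1 := fun h => hy h.symm
        rw [if_neg hy, if_pos h2]
        by_cases hgt : c' > m
        · rw [if_pos hgt, pvSel, if_pos hgt]
          exact ih c' c' (some x.1)
        · rw [if_neg hgt, pvSel, if_neg hgt]
          exact ih c' m t

-- foldl max pulled apart at the head
theorem pvFoldlMax (l : List Int) (a z : Int) :
    l.foldl max (max a z) = max a (l.foldl max z) := by
  induction l generalizing z with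
  | nil => rfl
  | cons w ws ihw =>
    simp only [List.foldl_cons]
    rw [max_assoc, ihw]

-- pvSel in terms of the global max and the first pair attaining it
theorem pvSel_eq (bs : List (Int × Int)) (m : Int) (t : Option Int) :
    pvSel m t bs
      = match PySem.List.max? (bs.map (·.2)) (fun y => y) with
        | none => t
        | some best =>
          if best ≤ m then t else (bs.find? (fun p => p.2 == best)).map (·.1) := by
  induction bs generalizing m t with
  | nil => rfl
  | cons p bs ih =>
    obtain ⟨k, c⟩ := p
    rw [show ((k, c) :: bs).map (·.2) = c :: bs.map (·.2) from rfl,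
      PySem.List.max?_id_cons]
    show (if c > m then pvSel c (some k) bs else pvSel m t bs) = _
    cases hbs : PySem.List.max? (bs.map (·.2)) (fun y => y) with
    | none =>
      have hnil : bs = [] := by
        have h0 := (PySem.List.max?_eq_none_iff
          (xs := bs.map (·.2)) (key := fun y => y)).mp hbs
        simpa using h0
      subst hnil
      simp only [List.map_nil, List.foldl_nil]
      by_cases h : c > m
      · rw [if_pos h, if_neg (by omega)]
        simp [pvSel, List.find?]
      · rw [if_neg h, if_pos (by omega)]
        rfl
    | some b =>
      have hfold : (bs.map (·.2)).foldl max c = max c b := by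
        cases hbm : bs.map (·.2) with
        | nil =>
          rw [hbm] at hbs
          simp [PySem.List.max?] at hbs
        | cons z zs =>
          rw [hbm] at hbs
          rw [PySem.List.max?_id_cons] at hbs
          have hz : zs.foldl max z = b := Option.some.inj hbs
          simp only [List.foldl_cons]
          rw [pvFoldlMax, hz]
      rw [hfold, ih c (some k), ih m t, hbs]
      simp only
      by_cases h : c > m
      · rw [if_pos h]
        by_cases hbc : b ≤ c
        · rw [if_pos hbc, max_eq_left hbc, if_neg (by omega),
            List.find?_cons_of_pos (by simp)]
          rfl
        · rw [if_neg hbc, max_eq_right (by omega), if_neg (by omega),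
            List.find?_cons_of_neg (by simp; omega)]
      · rw [if_neg h]
        by_cases hbm : b ≤ m
        · rw [if_pos hbm, if_pos (max_le (by omega) hbm)]
        · rw [if_neg hbm,
            if_neg (fun hh => hbm (le_trans (le_max_right c b) hh)),
            List.find?_cons_of_neg (by simp; omega), max_eq_right (by omega)]

-- ===== VERDICT =====
theorem busiestTimeInMall_spec : Claim_equal_busiestTimeInMall := by
  intro data _
  unfold Spec_busiestTimeInMall
  cases data with
  | nil => rfl
  | cons x xs =>
    show busiestTimeInMall (x :: xs) = busiestTimeInMall_alt (x :: xs)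
    unfold busiestTimeInMall
    have h := pvA_fold_eq_rec (x :: xs) 0 (0, 0, none)
    simp only [Nat.cast_zero, List.drop_zero] at h
    rw [h, pvARec_eq_sel, pvSel_eq]
    rfl
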